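-- pv_equiv track=rewrite | github.com/sibasmarak/elections | framework/captions.py | create_caption_dictionary
-- ===== SOURCE A (Python) =====
-- def create_caption_dictionary(details, captions=['jansatta.com']):
--     """
--     For each caption creates a dictionary of posts.
--     Parameters:
--     -----------
--     details: a dictionary of all details about a number of posts
--     captions: a list of captions to analyse
--
--     Returns:
--     --------
--     caption_post_dictionary: a dictionary of the form {caption : {id: post}}
--     """
--
--     # create a dictionary with keys as the captions
--     caption_post_dictionary = {}
--     for caption in captions:
--         caption_post_dictionary[caption] = {}
--
--     # traverse through all the posts
--     # if the caption of a post in captions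
--     # add the post to the dictionary with that caption as key
--     for id, post in list(details.items()):
--         try:
--             # fetch the caption
--             post_caption = post['post_details']['caption']
--             # add to the dictionary
--             if post_caption in captions:
--                 caption_post_dictionary[post_caption][id] = post
--         except:
--             # when caption is not available
--             pass
--
--     return caption_post_dictionary
-- ===== SOURCE B (Python) =====
-- def create_caption_dictionary(details, captions=['jansatta.com']):
--     # Sort-then-sweep grouping: annotate each post with its caption, stably sort
--     # by caption so equal captions become contiguous (ids keep insertion order),
--     # sweep the runs into per-caption dicts, then project onto the requested captions.
--     annotated = []
--     for id, post in details.items():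
--         try:
--             annotated.append((post['post_details']['caption'], id, post))
--         except:
--             pass
--     annotated.sort(key=lambda t: t[0])
--     groups = {}
--     run = {}
--     prev = None
--     for cap, id, post in annotated:
--         if prev is not None and cap != prev:
--             groups[prev] = run
--             run = {}
--         run[id] = post
--         prev = cap
--     if prev is not None:
--         groups[prev] = run
--     return {c: groups.get(c, {}) for c in captions}
-- ===== Notes on version B (the rewrite author's own statement) =====
-- stated objective: alternative
-- what changed: A preallocates a bucket per requested caption and fills them in one pass with a membership test per post; B annotates each post with its caption, stably sorts by caption, sweeps the contiguous runs into per-caption dicts, and projects the result onto the requested captions (stability keeps the ids in insertion order).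
import Mathlib
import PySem

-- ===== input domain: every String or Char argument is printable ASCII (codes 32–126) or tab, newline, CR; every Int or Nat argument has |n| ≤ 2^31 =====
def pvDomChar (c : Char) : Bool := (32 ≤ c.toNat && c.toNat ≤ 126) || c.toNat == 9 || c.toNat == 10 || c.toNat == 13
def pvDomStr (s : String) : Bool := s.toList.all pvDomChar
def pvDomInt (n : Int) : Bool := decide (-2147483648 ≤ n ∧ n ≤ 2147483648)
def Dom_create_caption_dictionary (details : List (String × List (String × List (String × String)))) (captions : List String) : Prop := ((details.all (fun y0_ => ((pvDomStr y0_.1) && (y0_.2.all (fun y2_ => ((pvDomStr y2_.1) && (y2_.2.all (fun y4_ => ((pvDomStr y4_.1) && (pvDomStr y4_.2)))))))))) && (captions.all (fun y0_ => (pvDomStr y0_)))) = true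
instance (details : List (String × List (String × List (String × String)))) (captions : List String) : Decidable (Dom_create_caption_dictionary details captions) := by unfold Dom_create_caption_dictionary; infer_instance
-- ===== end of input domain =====

-- B replaces A's single accumulating pass (membership test per post into preallocated
-- buckets) by annotate + stable sort by caption + a sweep of the contiguous runs,
-- projected onto the requested captions (objective: alternative algorithm, same output).

-- a post: dict[str, dict[str, str]]
abbrev PvPost := List (String × List (String × String))
-- an inner {id: post} dict
abbrev PvInner := PySem.Dict String PvPost
-- the outer {caption: {id: post}} dict
abbrev PvOuter := PySem.Dict String PvInner
-- an annotated post: (caption, id, post)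
abbrev PvAnn := String × String × PvPost

-- shared transliteration of post['post_details']['caption'] (none = the KeyError the
-- blanket except of both A and B swallows)
def pvPostCaption (post : PvPost) : Option String :=
  match (PySem.Dict.ofList post).get? "post_details" with
  | none => none
  | some pd => (PySem.Dict.ofList pd).get? "caption"

-- ===== PORT A =====
def create_caption_dictionary (details : List (String × List (String × List (String × String)))) (captions : List String) : List (String × List (String × List (String × List (String × String)))) :=
  -- create a dictionary with keys as the captions
  let init : PvOuter := captions.foldl (fun d c => d.insert c PySem.Dict.empty) PySem.Dict.empty
  -- traverse all posts; if the caption of a post is in captions, add the post there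
  let final : PvOuter := (PySem.Dict.ofList details).items.foldl (fun d p =>
    match pvPostCaption p.2 with
    | some cap => if captions.contains cap then d.modify cap PySem.Dict.empty (fun m => m.insert p.1 p.2) else d
    | none => d) init
  final.items.map (fun q => (q.1, q.2.items))

-- ===== PORT B =====
-- the body of B's sweep loop over the sorted annotated posts; state = (groups, run, prev)
def pvSweepStep (st : PvOuter × PvInner × Option String) (t : PvAnn) : PvOuter × PvInner × Option String :=
  let st1 : PvOuter × PvInner :=
    match st.2.2 with
    | some prev => if t.1 ≠ prev then (st.1.insert prev st.2.1, PySem.Dict.empty) else (st.1, st.2.1)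
    | none => (st.1, st.2.1)
  (st1.1, st1.2.insert t.2.1 t.2.2, some t.1)

-- 'if prev is not None: groups[prev] = run' after the loop
def pvFinalize (st : PvOuter × PvInner × Option String) : PvOuter :=
  match st.2.2 with
  | some prev => st.1.insert prev st.2.1
  | none => st.1

def create_caption_dictionary_alt (details : List (String × List (String × List (String × String)))) (captions : List String) : List (String × List (String × List (String × List (String × String)))) :=
  -- annotate: append (caption, id, post), skipping posts whose caption fetch raises
  let annotated : List PvAnn := (PySem.Dict.ofList details).items.foldl (fun acc p =>
    match pvPostCaption p.2 with
    | some cap => acc ++ [(cap, p.1, p.2)]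
    | none => acc) []
  -- annotated.sort(key=lambda t: t[0])  — stable
  let sortedAnn := PySem.List.sorted annotated (fun t => t.1)
  -- sweep the contiguous runs of equal caption into groups
  let groups : PvOuter := pvFinalize (sortedAnn.foldl pvSweepStep (PySem.Dict.empty, PySem.Dict.empty, none))
  -- {c: groups.get(c, {}) for c in captions}
  let res : PvOuter := captions.foldl (fun r c => r.insert c (groups.getD c PySem.Dict.empty)) PySem.Dict.empty
  res.items.map (fun q => (q.1, q.2.items))

-- ===== PRECONDITION & SPEC =====
def Spec_create_caption_dictionary (details : List (String × List (String × List (String × String)))) (captions : List String) (out : List (String × List (String × List (String × List (String × String))))) : Prop := out = create_caption_dictionary_alt details captions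
instance (details : List (String × List (String × List (String × String)))) (captions : List String) (out : List (String × List (String × List (String × List (String × String))))) : Decidable (Spec_create_caption_dictionary details captions out) := by
  unfold Spec_create_caption_dictionary
  haveI d0 : DecidableEq (List (String × String)) := inferInstance
  haveI d1 : DecidableEq (List (String × List (String × String))) := inferInstance
  haveI d2 : DecidableEq (List (String × List (String × List (String × String)))) := inferInstance
  infer_instance

-- ===== CLAIM (what is proved, stated in full; the proofs are below) =====
def Claim_equal_create_caption_dictionary : Prop := ∀ (details : List (String × List (String × List (String × String)))) (captions : List String), Dom_create_caption_dictionary details captions → Spec_create_caption_dictionary details captions (create_caption_dictionary details captions)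

-- ===== LEMMAS AND PROOFS =====

-- A's per-post loop body, named for the lemmas
def pvStepA (captions : List String) (d : PvOuter) (p : String × PvPost) : PvOuter :=
  match pvPostCaption p.2 with
  | some cap => if captions.contains cap then d.modify cap PySem.Dict.empty (fun m => m.insert p.1 p.2) else d
  | none => d

-- the posts that land in caption c's inner dict
def pvStepC (c : String) (m : PvInner) (p : String × PvPost) : PvInner :=
  if pvPostCaption p.2 = some c then m.insert p.1 p.2 else m

-- B's annotated list, denotationally
def pvAnnot (l : List (String × PvPost)) : List PvAnn :=
  l.filterMap (fun p => (pvPostCaption p.2).map (fun cap => (cap, p.1, p.2)))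

theorem pv_annot_fold (l : List (String × PvPost)) (acc : List PvAnn) :
    l.foldl (fun acc p =>
      match pvPostCaption p.2 with
      | some cap => acc ++ [(cap, p.1, p.2)]
      | none => acc) acc = acc ++ pvAnnot l := by
  induction l generalizing acc with
  | nil => simp [pvAnnot]
  | cons p rest ih =>
    simp only [List.foldl_cons, pvAnnot, List.filterMap_cons]
    cases hcap : pvPostCaption p.2 with
    | none => simpa [pvAnnot] using ih acc
    | some cap => simpa [pvAnnot] using ih (acc ++ [(cap, p.1, p.2)])

-- inserting the c-captioned annotated posts = the pvStepC fold over the raw posts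
theorem pv_filter_annot (c : String) (l : List (String × PvPost)) (m : PvInner) :
    ((pvAnnot l).filter (fun t => decide (t.1 = c))).foldl (fun m t => m.insert t.2.1 t.2.2) m
      = l.foldl (pvStepC c) m := by
  induction l generalizing m with
  | nil => rfl
  | cons p rest ih =>
    simp only [pvAnnot, List.filterMap_cons, List.foldl_cons]
    cases hcap : pvPostCaption p.2 with
    | none =>
      have : pvStepC c m p = m := by unfold pvStepC; rw [hcap]; simp
      rw [this]; exact ih m
    | some cap =>
      by_cases hc : cap = c
      · have : pvStepC c m p = m.insert p.1 p.2 := by unfold pvStepC; rw [hcap, hc]; simp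
        rw [this]; simpa [hc] using ih (m.insert p.1 p.2)
      · have : pvStepC c m p = m := by unfold pvStepC; rw [hcap]; simp [hc]
        rw [this]; simpa [hc] using ih m
  -- (the unmatched annotated posts contribute nothing to c's dict)

-- insertBy (stable insertion by caption) preserves caption-sortedness
theorem pv_insertBy_pairwise (x : PvAnn) (l : List PvAnn)
    (h : l.Pairwise (fun a b => a.1 ≤ b.1)) :
    (PySem.List.insertBy (fun a b => decide (a.1 < b.1)) x l).Pairwise (fun a b => a.1 ≤ b.1) := by
  induction l with
  | nil => simp [PySem.List.insertBy]
  | cons y t ih =>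
    rw [List.pairwise_cons] at h
    simp only [PySem.List.insertBy]
    by_cases hb : x.1 < y.1
    · simp only [hb, decide_true, if_true]
      refine List.pairwise_cons.mpr ⟨?_, List.pairwise_cons.mpr h⟩
      intro z hz
      rcases List.mem_cons.mp hz with rfl | hz
      · exact le_of_lt hb
      · exact le_trans (le_of_lt hb) (h.1 z hz)
    · simp only [hb, decide_false, Bool.false_eq_true, if_false]
      refine List.pairwise_cons.mpr ⟨?_, ih h.2⟩
      intro z hz
      rcases (PySem.List.mem_insertBy _ _ _ _).mp hz with rfl | hz
      · exact le_of_not_gt hb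
      · exact h.1 z hz

-- filtering one caption through a stable insertion into a sorted list
theorem pv_filter_insertBy (c : String) (x : PvAnn) (l : List PvAnn)
    (h : l.Pairwise (fun a b => a.1 ≤ b.1)) :
    (PySem.List.insertBy (fun a b => decide (a.1 < b.1)) x l).filter (fun t => decide (t.1 = c))
      = if x.1 = c then l.filter (fun t => decide (t.1 = c)) ++ [x]
        else l.filter (fun t => decide (t.1 = c)) := by
  induction l with
  | nil => simp [PySem.List.insertBy, List.filter]; split_ifs with hx <;> simp [hx]
  | cons y t ih =>
    rw [List.pairwise_cons] at h
    simp only [PySem.List.insertBy]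
    by_cases hb : x.1 < y.1
    · simp only [hb, decide_true, if_true]
      by_cases hx : x.1 = c
      · -- every element of y :: t has caption ≥ y.1 > x.1 = c, so none equals c
        have hnone : (y :: t).filter (fun t => decide (t.1 = c)) = [] := by
          rw [List.filter_eq_nil_iff]
          intro z hz
          have hzc : c < z.1 := by
            rcases List.mem_cons.mp hz with rfl | hz
            · exact hx ▸ hb
            · exact lt_of_lt_of_le (hx ▸ hb) (h.1 z hz)
          simp [ne_of_gt hzc]
        have hfx : (x :: y :: t).filter (fun u => decide (u.1 = c)) = [x] := by
          rw [List.filter_cons, hnone]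
          simp [hx]
        rw [if_pos hx, hfx, hnone]
        simp
      · rw [if_neg hx]
        simp [List.filter_cons, hx]
    · simp only [hb, decide_false, Bool.false_eq_true, if_false]
      rw [List.filter_cons, List.filter_cons, ih h.2]
      by_cases hx : x.1 = c <;> by_cases hy : y.1 = c <;> simp [hx, hy]

-- STABILITY: the c-captioned posts come out of the stable sort in their original order
theorem pv_filter_sorted_aux (c : String) (xs : List PvAnn) (acc : List PvAnn)
    (h : acc.Pairwise (fun a b => a.1 ≤ b.1)) :
    (xs.foldl (fun acc x => PySem.List.insertBy (fun a b => decide (a.1 < b.1)) x acc) acc).filter (fun t => decide (t.1 = c))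
      = acc.filter (fun t => decide (t.1 = c)) ++ xs.filter (fun t => decide (t.1 = c)) := by
  induction xs generalizing acc with
  | nil => simp
  | cons x rest ih =>
    rw [List.foldl_cons, ih _ (pv_insertBy_pairwise x acc h), pv_filter_insertBy c x acc h,
        List.filter_cons]
    by_cases hx : x.1 = c <;> simp [hx]

theorem pv_filter_sorted (c : String) (xs : List PvAnn) :
    (PySem.List.sorted xs (fun t => t.1)).filter (fun t => decide (t.1 = c))
      = xs.filter (fun t => decide (t.1 = c)) := by
  rw [PySem.List.sorted_eq_foldl_insertBy, pv_filter_sorted_aux c xs [] (by simp)]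
  rfl

-- the sweep, seen at one caption c, mid-loop
theorem pv_sweep_go (s : List PvAnn) (g : PvOuter) (r : PvInner) (pc : String)
    (hs : s.Pairwise (fun a b => a.1 ≤ b.1)) (hpc : ∀ t ∈ s, pc ≤ t.1) (c : String) :
    (pvFinalize (s.foldl pvSweepStep (g, r, some pc))).getD c PySem.Dict.empty
      = if c = pc then (s.filter (fun t => decide (t.1 = c))).foldl (fun m t => m.insert t.2.1 t.2.2) r
        else if c ∈ s.map (fun t => t.1) then (s.filter (fun t => decide (t.1 = c))).foldl (fun m t => m.insert t.2.1 t.2.2) PySem.Dict.empty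
        else g.getD c PySem.Dict.empty := by
  induction s generalizing g r pc with
  | nil =>
    simp only [List.foldl_nil, pvFinalize, List.filter_nil, List.foldl_nil, List.map_nil,
      List.not_mem_nil, if_false]
    by_cases hc : c = pc
    · simp [hc, PySem.Dict.getD_insert]
    · simp [hc, PySem.Dict.getD_insert, Ne.symm, hc]
  | cons t rest ih =>
    rw [List.pairwise_cons] at hs
    have hpt : pc ≤ t.1 := hpc t (List.mem_cons_self ..)
    by_cases ht : t.1 = pc
    · -- same run continues
      have hstep : pvSweepStep (g, r, some pc) t = (g, r.insert t.2.1 t.2.2, some pc) := by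
        simp [pvSweepStep, ht]
      rw [List.foldl_cons, hstep, ih g _ pc hs.2 (fun u hu => hpc u (List.mem_cons_of_mem _ hu)) ]
      by_cases hc : c = pc
      · have htc : t.1 = c := ht.trans hc.symm
        simp [hc, List.filter_cons, htc]
      · have htc : ¬ t.1 = c := fun h => hc (h ▸ ht)
        have hfil : (t :: rest).filter (fun u => decide (u.1 = c)) = rest.filter (fun u => decide (u.1 = c)) := by
          rw [List.filter_cons, if_neg (by simpa using htc)]
        rw [if_neg hc, if_neg hc, hfil, List.map_cons]
        by_cases hm : c ∈ rest.map (fun t => t.1)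
        · rw [if_pos hm, if_pos (List.mem_cons.mpr (Or.inr hm))]
        · rw [if_neg hm, if_neg (by
            simp only [List.mem_cons, not_or]
            exact ⟨fun h => htc h.symm, hm⟩)]
    · -- run boundary: flush the pc-run, start t's run
      have hlt : pc < t.1 := lt_of_le_of_ne hpt (fun h => ht h.symm)
      have hstep : pvSweepStep (g, r, some pc) t
          = (g.insert pc r, PySem.Dict.empty.insert t.2.1 t.2.2, some t.1) := by
        simp [pvSweepStep, ht]
      have hrest_gt : ∀ u ∈ rest, pc < u.1 := fun u hu => lt_of_lt_of_le hlt (hs.1 u hu)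
      rw [List.foldl_cons, hstep, ih (g.insert pc r) _ t.1 hs.2 hs.1]
      by_cases hc : c = pc
      · -- c's run is exactly r: nothing with caption pc remains
        have hno : ¬ c = t.1 := fun h => ht (h ▸ hc)
        have hnm : c ∉ rest.map (fun t => t.1) := by
          simp only [List.mem_map, not_exists, not_and]
          intro u hu h
          have hgt := hrest_gt u hu
          rw [h, hc] at hgt
          exact lt_irrefl _ hgt
        have hfil : (t :: rest).filter (fun u => decide (u.1 = c)) = [] := by
          rw [List.filter_eq_nil_iff]
          intro u hu
          rcases List.mem_cons.mp hu with rfl | hu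
          · simpa using fun h : u.1 = c => hno h.symm
          · have hgt := hrest_gt u hu
            simp only [decide_eq_true_eq]
            intro h
            rw [h, hc] at hgt
            exact lt_irrefl _ hgt
        rw [if_pos hc, if_neg hno, if_neg hnm, hfil]
        simp [PySem.Dict.getD_insert, hc]
      · rw [if_neg hc]
        by_cases hct : c = t.1
        · have : c ∈ (t :: rest).map (fun t => t.1) := by simp [hct]
          rw [if_pos hct, if_pos this, List.filter_cons]
          simp [hct.symm]
        · rw [if_neg hct]
          have hmm : (c ∈ rest.map (fun t => t.1)) ↔ (c ∈ (t :: rest).map (fun t => t.1)) := by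
            simp [List.mem_cons, hct]
          by_cases hm : c ∈ rest.map (fun t => t.1)
          · rw [if_pos hm, if_pos (hmm.mp hm), List.filter_cons,
                if_neg (by simpa using fun h : t.1 = c => hct h.symm)]
          · rw [if_neg hm, if_neg (fun h => hm (hmm.mpr h)), PySem.Dict.getD_insert]
            simp [hc]

-- the whole sweep of a caption-sorted list, seen at one caption c
theorem pv_sweep_getD (s : List PvAnn) (hs : s.Pairwise (fun a b => a.1 ≤ b.1)) (c : String) :
    (pvFinalize (s.foldl pvSweepStep (PySem.Dict.empty, PySem.Dict.empty, none))).getD c PySem.Dict.empty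
      = (s.filter (fun t => decide (t.1 = c))).foldl (fun m t => m.insert t.2.1 t.2.2) PySem.Dict.empty := by
  cases s with
  | nil => rfl
  | cons t rest =>
    rw [List.pairwise_cons] at hs
    have hstep : pvSweepStep (PySem.Dict.empty, PySem.Dict.empty, none) t
        = (PySem.Dict.empty, PySem.Dict.empty.insert t.2.1 t.2.2, some t.1) := by
      simp [pvSweepStep]
    rw [List.foldl_cons, hstep, pv_sweep_go rest PySem.Dict.empty _ t.1 hs.2 hs.1 c]
    by_cases hct : c = t.1
    · rw [if_pos hct, List.filter_cons]
      simp [hct.symm]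
    · rw [if_neg hct]
      by_cases hm : c ∈ rest.map (fun t => t.1)
      · rw [if_pos hm, List.filter_cons, if_neg (by simpa using fun h : t.1 = c => hct h.symm)]
      · have hfil : (t :: rest).filter (fun u => decide (u.1 = c)) = [] := by
          rw [List.filter_eq_nil_iff]
          intro u hu
          rcases List.mem_cons.mp hu with rfl | hu
          · simpa using fun h : u.1 = c => hct h.symm
          · simpa using fun h : u.1 = c => hm (List.mem_map.mpr ⟨u, hu, h⟩)
        rw [if_neg hm, hfil]
        simp [PySem.Dict.getD_empty]

-- getD through a fold that inserts a value depending only on the key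
theorem pv_getD_foldl_insert (l : List String) (h : String → PvInner) (acc : PvOuter) (c : String) :
    (l.foldl (fun r x => r.insert x (h x)) acc).getD c PySem.Dict.empty
      = if c ∈ l then h c else acc.getD c PySem.Dict.empty := by
  induction l generalizing acc with
  | nil => simp
  | cons x rest ih =>
    simp only [List.foldl_cons, ih, PySem.Dict.getD_insert, List.mem_cons]
    by_cases hr : c ∈ rest <;> by_cases hx : c = x <;> simp [hr, hx]

-- A's loop seen at one caption c ∈ captions
theorem pv_getD_stepA (captions : List String) (l : List (String × PvPost)) (d : PvOuter)
    (c : String) (hc : captions.contains c = true) :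
    (l.foldl (pvStepA captions) d).getD c PySem.Dict.empty
      = l.foldl (pvStepC c) (d.getD c PySem.Dict.empty) := by
  induction l generalizing d with
  | nil => rfl
  | cons p rest ih =>
    simp only [List.foldl_cons, ih]
    congr 1
    unfold pvStepA pvStepC
    cases hcap : pvPostCaption p.2 with
    | none => simp
    | some cap =>
      by_cases hin : captions.contains cap = true
      · simp only [hin, if_true, PySem.Dict.getD_modify]
        by_cases hec : c = cap
        · simp [hec]
        · simp [hec, Ne.symm hec]
      · have hne : cap ≠ c := fun h => hin (h ▸ hc)
        have hmem : cap ∉ captions := by simpa using hin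
        simp [hmem, hne]

-- A's loop never touches the key list (every modify hits a preallocated key)
theorem pv_keys_stepA (captions : List String) (l : List (String × PvPost)) (d : PvOuter)
    (hd : ∀ x, captions.contains x = true → d.contains x = true) :
    (l.foldl (pvStepA captions) d).keys = d.keys := by
  induction l generalizing d with
  | nil => rfl
  | cons p rest ih =>
    simp only [List.foldl_cons]
    cases hcap : pvPostCaption p.2 with
    | none =>
      rw [show pvStepA captions d p = d by unfold pvStepA; rw [hcap]]
      exact ih d hd
    | some cap =>
      by_cases hin : captions.contains cap = true
      · have hstep : pvStepA captions d p = d.modify cap PySem.Dict.empty (fun m => m.insert p.1 p.2) := by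
          have hmem : cap ∈ captions := by simpa using hin
          unfold pvStepA; rw [hcap]; simp [hmem]
        rw [hstep, ih]
        · rw [PySem.Dict.keys_modify, PySem.Dict.keys_insert_of_contains _ _ (hd cap hin)]
        · intro x hx
          rw [PySem.Dict.contains_modify]
          simp [hd x hx]
      · have hmem : cap ∉ captions := by simpa using hin
        rw [show pvStepA captions d p = d by unfold pvStepA; rw [hcap]; simp [hmem]]
        exact ih d hd

-- ===== VERDICT (by name: the statement is the Claim_ definition above) =====
theorem create_caption_dictionary_spec : Claim_equal_create_caption_dictionary := by
  intro details captions _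
  unfold Spec_create_caption_dictionary create_caption_dictionary create_caption_dictionary_alt
  set l := (PySem.Dict.ofList details).items with hl
  set ann : List PvAnn := l.foldl (fun acc p =>
    match pvPostCaption p.2 with
    | some cap => acc ++ [(cap, p.1, p.2)]
    | none => acc) [] with hann
  set G : PvOuter := pvFinalize ((PySem.List.sorted ann (fun t => t.1)).foldl pvSweepStep
    (PySem.Dict.empty, PySem.Dict.empty, none)) with hG
  show (l.foldl (pvStepA captions)
      (captions.foldl (fun d c => d.insert c PySem.Dict.empty) PySem.Dict.empty)).items.map (fun q => (q.1, q.2.items))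
    = ((captions.foldl (fun r c => r.insert c (G.getD c PySem.Dict.empty)) PySem.Dict.empty) : PvOuter).items.map (fun q => (q.1, q.2.items))
  -- G, seen at one caption, is the pvStepC fold over the raw posts
  have hGc : ∀ c, G.getD c PySem.Dict.empty = l.foldl (pvStepC c) PySem.Dict.empty := by
    intro c
    have hann' : ann = pvAnnot l := by rw [hann, pv_annot_fold]; rfl
    rw [hG, pv_sweep_getD _ (PySem.List.sorted_pairwise ann (fun t => t.1)) c,
        pv_filter_sorted c ann, hann', pv_filter_annot c l PySem.Dict.empty]
  set init : PvOuter := captions.foldl (fun d c => d.insert c PySem.Dict.empty) PySem.Dict.empty with hinit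
  set DA : PvOuter := l.foldl (pvStepA captions) init with hDA
  set DB : PvOuter := captions.foldl (fun r c => r.insert c (G.getD c PySem.Dict.empty)) PySem.Dict.empty with hDB
  -- keys of the preallocation / of B's projection
  have hkinit : init.keys = PySem.Set.update ([] : List String) captions := by
    rw [hinit, PySem.Dict.keys_foldl_insert captions (fun _ _ => PySem.Dict.empty), PySem.Dict.keys_empty]
  have hkDB : DB.keys = PySem.Set.update ([] : List String) captions := by
    rw [hDB, PySem.Dict.keys_foldl_insert captions (fun _ x => G.getD x PySem.Dict.empty), PySem.Dict.keys_empty]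
  have hinitc : ∀ x, captions.contains x = true → init.contains x = true := by
    intro x hx
    rw [PySem.Dict.contains_iff_mem_keys, hkinit, PySem.Set.mem_update]
    right; simpa using hx
  have hkDA : DA.keys = PySem.Set.update ([] : List String) captions := by
    rw [hDA, pv_keys_stepA captions l init hinitc, hkinit]
  -- nodup keys on both sides
  have hndinit : init.keys.Nodup := by
    rw [hinit]; exact PySem.Dict.nodup_keys_foldl_insert captions (fun _ _ => PySem.Dict.empty) _ PySem.Dict.nodup_keys_empty
  have hndDA : DA.keys.Nodup := by rw [hkDA, ← hkinit]; exact hndinit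
  have hndDB : DB.keys.Nodup := by
    rw [hDB]; exact PySem.Dict.nodup_keys_foldl_insert captions (fun _ x => G.getD x PySem.Dict.empty) _ PySem.Dict.nodup_keys_empty
  -- the two dicts agree entry by entry
  have hitems : DA.items = DB.items := by
    rw [PySem.Dict.items_eq_map_keys DA hndDA PySem.Dict.empty,
        PySem.Dict.items_eq_map_keys DB hndDB PySem.Dict.empty, hkDA, hkDB]
    apply List.map_congr_left
    intro k hk
    have hkc : k ∈ captions := by
      rcases (PySem.Set.mem_update ([] : List String) captions k).mp hk with h | h
      · cases h
      · exact h
    have hc : captions.contains k = true := by simpa using hkc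
    have hA : DA.getD k PySem.Dict.empty = l.foldl (pvStepC k) PySem.Dict.empty := by
      rw [hDA, pv_getD_stepA captions l init k hc, hinit,
          pv_getD_foldl_insert captions (fun _ => PySem.Dict.empty) PySem.Dict.empty k]
      simp
    have hB : DB.getD k PySem.Dict.empty = l.foldl (pvStepC k) PySem.Dict.empty := by
      rw [hDB, pv_getD_foldl_insert captions (fun c => G.getD c PySem.Dict.empty) PySem.Dict.empty k,
          if_pos hkc, hGc k]
    rw [hA, hB]
  rw [hitems]
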